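-- pv_equiv track=rewrite | github.com/fzakaria/sqlelf | sqlelf/elf.py | split_with_index
-- ===== SOURCE A (Python) =====
-- def split_with_index(str: str, delimiter: str) -> list[tuple[int, str]]:
--     """Split a string with the delimiter and return the index
--     of the start of the split."""
--     start = 0
--     result = []
--     for i, c in enumerate(str):
--         if c == delimiter:
--             result.append((start, str[start:i]))
--             start = i + 1
--     result.append((start, str[start:]))
--     return result
-- ===== SOURCE B (Python) =====
-- def split_with_index(str: str, delimiter: str) -> list[tuple[int, str]]:
--     """Split a string with the delimiter and return the index
--     of the start of the split."""
--     result = []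
--     seg = ''
--     for i in range(len(str) - 1, -1, -1):
--         c = str[i]
--         if c == delimiter:
--             result = [(i + 1, seg)] + result
--             seg = ''
--         else:
--             seg = c + seg
--     return [(0, seg)] + result
-- ===== Notes on version B (the rewrite author's own statement) =====
-- stated objective: alternative
-- what changed: B scans the string in reverse, building each segment by prepending characters and consing finished (start, segment) pairs onto the result, instead of A's forward scan that tracks a start index and slices str[start:i] at each delimiter.
import Mathlib
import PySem

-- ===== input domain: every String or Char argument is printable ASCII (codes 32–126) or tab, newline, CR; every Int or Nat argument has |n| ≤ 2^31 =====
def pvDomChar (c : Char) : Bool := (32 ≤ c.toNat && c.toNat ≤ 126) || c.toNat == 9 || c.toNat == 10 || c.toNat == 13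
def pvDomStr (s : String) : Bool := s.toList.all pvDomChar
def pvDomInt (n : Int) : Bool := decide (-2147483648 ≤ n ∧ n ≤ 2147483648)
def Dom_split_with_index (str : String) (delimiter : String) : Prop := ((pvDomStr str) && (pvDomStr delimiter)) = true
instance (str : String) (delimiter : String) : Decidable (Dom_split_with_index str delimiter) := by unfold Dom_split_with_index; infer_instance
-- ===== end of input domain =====

-- B replaces A's forward scan with index slicing by a reverse scan that accumulates each
-- segment character by character and conses finished pieces onto the result ("alternative").

-- ===== PORT A =====
-- A: one forward pass over enumerate(str); state is (start, result); slices str[start:i]; tail appended after the loop.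
def split_with_index (str : String) (delimiter : String) : List (Int × String) :=
  let cs := str.toList
  let p :=
    (PySem.List.enumerate cs).foldl
      (fun (st : Int × List (Int × String)) ic =>
        if [ic.2] = delimiter.toList then
          (ic.1 + 1, st.2 ++ [(st.1, String.ofList (PySem.List.slice cs (some st.1) (some ic.1)))])
        else st)
      (0, [])
  p.2 ++ [(p.1, String.ofList (PySem.List.slice cs (some p.1) none))]

-- ===== PORT B =====
-- B: reverse loop 'for i in range(len(str)-1, -1, -1)' = foldr over enumerate; state is (seg, result);
-- no slicing: the current segment is built by prepending characters, finished pieces are consed on.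
def split_with_index_alt (str : String) (delimiter : String) : List (Int × String) :=
  let cs := str.toList
  let p :=
    (PySem.List.enumerate cs).foldr
      (fun ic (st : List Char × List (Int × String)) =>
        if [ic.2] = delimiter.toList then
          ([], (ic.1 + 1, String.ofList st.1) :: st.2)
        else (ic.2 :: st.1, st.2))
      ([], [])
  (0, String.ofList p.1) :: p.2

-- ===== PRECONDITION & SPEC =====
def Spec_split_with_index (str : String) (delimiter : String) (out : List (Int × String)) : Prop := out = split_with_index_alt str delimiter
instance (str : String) (delimiter : String) (out : List (Int × String)) : Decidable (Spec_split_with_index str delimiter out) := by unfold Spec_split_with_index; infer_instance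

-- ===== CLAIM (what is proved, stated in full; the proofs are below) =====
def Claim_equal_split_with_index : Prop := ∀ (str : String) (delimiter : String), Dom_split_with_index str delimiter → Spec_split_with_index str delimiter (split_with_index str delimiter)

-- ===== LEMMAS AND PROOFS =====

-- Reference recursive splitter both ports are reduced to.
def refSplit (d : List Char) (k : Int) : List Char → List (Int × String)
  | [] => [(k, String.ofList [])]
  | c :: cs =>
    if [c] = d then (k, String.ofList []) :: refSplit d (k + 1) cs
    else
      match refSplit d (k + 1) cs with
      | [] => []
      | (_, t) :: rest => (k, String.ofList (c :: t.toList)) :: rest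

theorem refSplit_nodelim (d : List Char) (k : Int) (l : List Char)
    (h : ∀ c ∈ l, ¬([c] = d)) : refSplit d k l = [(k, String.ofList l)] := by
  induction l generalizing k with
  | nil => rfl
  | cons c cs ih =>
      have hc : ¬([c] = d) := h c (by simp)
      simp only [refSplit, if_neg hc, ih (k + 1) (fun x hx => h x (by simp [hx]))]
      simp

theorem refSplit_mid (d : List Char) (mid : List Char)
    (hmid : ∀ c ∈ mid, ¬([c] = d)) (c : Char) (hc : [c] = d) (rest : List Char) (k : Int) :
    refSplit d k (mid ++ c :: rest)
      = (k, String.ofList mid) :: refSplit d (k + mid.length + 1) rest := by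
  induction mid generalizing k with
  | nil => simp [refSplit, if_pos hc]
  | cons m mid' ih =>
      have hm : ¬([m] = d) := hmid m (by simp)
      simp only [List.cons_append, refSplit, if_neg hm,
        ih (fun x hx => hmid x (by simp [hx])) (k + 1)]
      simp only [String.toList_ofList, List.length_cons]
      have harg : (k + 1) + (mid'.length : Int) + 1 = k + ((mid'.length + 1 : Nat) : Int) + 1 := by
        push_cast; ring
      rw [harg]

-- B's foldr over enumerate computes refSplit.
theorem alt_foldr_eq (d : List Char) (cs : List Char) : ∀ (k : Int),
    (let p :=
      (PySem.List.enumerate cs k).foldr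
        (fun ic (st : List Char × List (Int × String)) =>
          if [ic.2] = d then ([], (ic.1 + 1, String.ofList st.1) :: st.2)
          else (ic.2 :: st.1, st.2))
        ([], []);
     (k, String.ofList p.1) :: p.2) = refSplit d k cs := by
  induction cs with
  | nil => intro k; rfl
  | cons c cs ih =>
      intro k
      rw [PySem.List.enumerate_cons]
      by_cases hc : [c] = d
      · simp only [List.foldr_cons, if_pos hc, refSplit, ← ih (k + 1)]
      · simp only [List.foldr_cons, if_neg hc, refSplit, ← ih (k + 1)]
        simp

-- A's foldl over enumerate computes refSplit: invariant version.
-- State is (s, acc); rest = cs.drop k; cs[s:k) holds no delimiter.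
theorem a_foldl_eq (d : List Char) (cs : List Char) : ∀ (rest : List Char) (k s : Nat)
    (acc : List (Int × String)),
    rest = cs.drop k → s ≤ k → k ≤ cs.length →
    (∀ j (hj : j < cs.length), s ≤ j → j < k → ¬([cs[j]] = d)) →
    (let p :=
      (PySem.List.enumerate rest (k : Int)).foldl
        (fun (st : Int × List (Int × String)) ic =>
          if [ic.2] = d then
            (ic.1 + 1, st.2 ++ [(st.1, String.ofList (PySem.List.slice cs (some st.1) (some ic.1)))])
          else st)
        ((s : Int), acc);
     p.2 ++ [(p.1, String.ofList (PySem.List.slice cs (some p.1) none))])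
      = acc ++ refSplit d (s : Int) (cs.drop s) := by
  intro rest
  induction rest with
  | nil =>
      intro k s acc hrest hsk hklen hnod
      have hk : k = cs.length := by
        have := congrArg List.length hrest
        simp at this
        omega
      simp only [PySem.List.enumerate_nil, List.foldl_nil]
      rw [PySem.List.slice_from_natCast]
      rw [refSplit_nodelim d (s : Int) (cs.drop s) ?_]
      intro c hc
      obtain ⟨j, hj, rfl⟩ := List.mem_iff_getElem.mp hc
      rw [List.getElem_drop]
      exact hnod (s + j) (by simp at hj; omega) (by omega) (by simp at hj; omega)
  | cons c rest' ih =>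
      intro k s acc hrest hsk hklen hnod
      have hklt : k < cs.length := by
        by_contra h
        have : cs.drop k = [] := List.drop_eq_nil_of_le (by omega)
        rw [this] at hrest; cases hrest
      have hdk : cs.drop k = cs[k] :: cs.drop (k + 1) := List.drop_eq_getElem_cons hklt
      rw [hdk] at hrest
      injection hrest with hck hrest'
      subst hck
      subst hrest'
      rw [PySem.List.enumerate_cons]
      by_cases hc : [cs[k]] = d
      · simp only [List.foldl_cons, if_pos hc]
        have hcast : ((k : Int) + 1) = ((k + 1 : Nat) : Int) := by push_cast; ring
        rw [hcast, ih (k + 1) (k + 1)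
          (acc ++ [((s : Int), String.ofList (PySem.List.slice cs (some (s : Int)) (some (k : Int))))])
          rfl (le_refl _) (by omega) (fun j hj h1 h2 => absurd h2 (by omega))]
        rw [List.append_assoc]
        congr 1
        rw [PySem.List.slice_natCast]
        have hnodmid : ∀ x ∈ (cs.drop s).take (k - s), ¬([x] = d) := by
          intro x hx
          obtain ⟨j, hj, rfl⟩ := List.mem_iff_getElem.mp hx
          have hjb : j < k - s ∧ s + j < cs.length := by
            simp [List.length_take, List.length_drop] at hj; omega
          rw [List.getElem_take, List.getElem_drop]
          exact hnod (s + j) hjb.2 (by omega) (by omega)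
        have hsplit : cs.drop s = (cs.drop s).take (k - s) ++ cs[k] :: cs.drop (k + 1) := by
          conv_lhs => rw [← List.take_append_drop (k - s) (cs.drop s)]
          congr 1
          rw [List.drop_drop]
          have hks : s + (k - s) = k := by omega
          rw [hks, List.drop_eq_getElem_cons hklt]
        conv_rhs => rw [hsplit]
        rw [refSplit_mid d _ hnodmid cs[k] hc _ _]
        have hlen : (((cs.drop s).take (k - s)).length : Int) = ((k : Int) - (s : Int)) := by
          simp [List.length_take, List.length_drop]; omega
        rw [hlen]
        simp only [List.singleton_append, List.cons.injEq]
        refine ⟨trivial, ?_⟩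
        congr 1
        omega
      · simp only [List.foldl_cons, if_neg hc]
        have hcast : ((k : Int) + 1) = ((k + 1 : Nat) : Int) := by push_cast; ring
        have hnod' : ∀ j (hj : j < cs.length), s ≤ j → j < k + 1 → ¬([cs[j]] = d) := by
          intro j hj h1 h2
          by_cases hjk : j < k
          · exact hnod j hj h1 hjk
          · have hje : j = k := by omega
            subst hje
            exact hc
        rw [hcast, ih (k + 1) s acc rfl (by omega) (by omega) hnod']

-- ===== VERDICT (by name: the statement is the Claim_ definition above) =====
theorem split_with_index_spec : Claim_equal_split_with_index := by
  intro str delimiter _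
  unfold Spec_split_with_index split_with_index split_with_index_alt
  have hB := alt_foldr_eq delimiter.toList str.toList 0
  have hA := a_foldl_eq delimiter.toList str.toList str.toList 0 0 []
    (by simp) (le_refl _) (by simp) (fun j hj h1 h2 => absurd h2 (by omega))
  simp only at hA hB
  simp only [List.nil_append, List.drop_zero, Nat.cast_zero] at hA
  rw [hA, ← hB]
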